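-- pv_equiv track=rewrite | github.com/GNT-CodingTest/programmers | programmers_level1/Splitting_numerical_array.py | solution
-- ===== SOURCE A (Python) =====
-- def solution(arr, divisor):
--     answer = []
--     for i in arr:
--         if not(i % divisor):
--             answer.append(i)
--
--     if not(len(answer)):
--         answer.append(-1)
--
--     return sorted(answer)
-- ===== SOURCE B (Python) =====
-- def solution(arr, divisor):
--     counts = {}
--     for x in arr:
--         if x % divisor == 0:
--             counts[x] = counts.get(x, 0) + 1
--     if not counts:
--         return [-1]
--     return [k for k in sorted(counts) for _ in range(counts[k])]
-- ===== Notes on version B (the rewrite author's own statement) =====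
-- stated objective: alternative
-- what changed: B builds a dict counting occurrences of each multiple in one pass, sorts only the distinct keys, and expands each key by its multiplicity; A filters into a list and sorts the whole filtered list. Pre_ excludes divisor == 0, on which '%' raises ZeroDivisionError whenever arr is non-empty; only the degenerate empty arr returns there.
-- outside the precondition, e.g. on solution([], 0): A returns [-1], B returns [-1]
import Mathlib
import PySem

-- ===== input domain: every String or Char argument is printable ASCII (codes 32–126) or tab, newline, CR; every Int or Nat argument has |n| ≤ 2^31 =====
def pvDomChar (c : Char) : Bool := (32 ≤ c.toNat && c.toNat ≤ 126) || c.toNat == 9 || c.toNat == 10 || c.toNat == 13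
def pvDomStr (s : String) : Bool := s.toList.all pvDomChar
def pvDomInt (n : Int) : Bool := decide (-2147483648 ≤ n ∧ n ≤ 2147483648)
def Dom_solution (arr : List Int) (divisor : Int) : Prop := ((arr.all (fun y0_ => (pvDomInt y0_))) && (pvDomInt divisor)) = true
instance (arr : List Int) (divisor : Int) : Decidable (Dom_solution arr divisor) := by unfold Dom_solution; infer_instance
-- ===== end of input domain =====

-- B counts multiples in a dict in one pass, sorts only the distinct keys and expands by multiplicity; A filters into a list and sorts it.


-- ===== PORT A =====
def solution (arr : List Int) (divisor : Int) : List Int :=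
  let answer := arr.foldl (fun acc i => if PySem.Int.mod i divisor == 0 then acc ++ [i] else acc) []
  let answer := if answer.length == 0 then answer ++ [-1] else answer
  PySem.List.sorted answer (fun x => x) false

-- ===== PORT B =====
def solution_alt (arr : List Int) (divisor : Int) : List Int :=
  let counts := arr.foldl
    (fun d x => if PySem.Int.mod x divisor == 0 then d.insert x (d.getD x 0 + 1) else d)
    PySem.Dict.empty
  if counts.items = [] then [-1]
  else (PySem.List.sorted counts.keys (fun x => x) false).flatMap
         (fun k => (PySem.List.pyRange 0 (counts.getD k 0) 1).map (fun _ => k))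

-- ===== PRECONDITION & SPEC =====
-- divisor = 0 makes Python's '%' raise ZeroDivisionError in A (and in B).
def Pre_solution (arr : List Int) (divisor : Int) : Prop := divisor ≠ 0
instance (arr : List Int) (divisor : Int) : Decidable (Pre_solution arr divisor) := by unfold Pre_solution; infer_instance
def pvWitness_solution : List Int × Int := ([5, 9, 7, 10], 5)

def Spec_solution (arr : List Int) (divisor : Int) (out : List Int) : Prop := out = solution_alt arr divisor
instance (arr : List Int) (divisor : Int) (out : List Int) : Decidable (Spec_solution arr divisor out) := by unfold Spec_solution; infer_instance

-- ===== CLAIM (what is proved, stated in full; the proofs are below) =====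
def Claim_equal_solution : Prop := ∀ (arr : List Int) (divisor : Int), Dom_solution arr divisor → Pre_solution arr divisor → Spec_solution arr divisor (solution arr divisor)

-- ===== LEMMAS AND PROOFS =====

-- counting occurrences of a in the expansion of a nodup key list
theorem count_flatMap_replicate (l m : List Int) (hnd : l.Nodup) (a : Int) :
    (l.flatMap (fun k => List.replicate (m.count k) k)).count a
      = if a ∈ l then m.count a else 0 := by
  induction l with
  | nil => simp
  | cons k l ih =>
    rcases List.nodup_cons.mp hnd with ⟨hk, hnd'⟩
    simp only [List.flatMap_cons, List.count_append, List.count_replicate, ih hnd',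
      List.mem_cons]
    by_cases hak : a = k
    · subst hak
      simp [hk]
    · simp [hak, Ne.symm hak]

-- the expansion is a permutation of m when l holds exactly m's distinct elements
theorem perm_flatMap_replicate (l m : List Int) (hnd : l.Nodup)
    (hmem : ∀ k, k ∈ l ↔ k ∈ m) :
    (l.flatMap (fun k => List.replicate (m.count k) k)).Perm m := by
  rw [List.perm_iff_count]
  intro a
  rw [count_flatMap_replicate l m hnd a]
  by_cases ha : a ∈ l
  · simp [ha]
  · have : a ∉ m := fun h => ha ((hmem a).mpr h)
    simp [ha, List.count_eq_zero.mpr this]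

-- expanding a strictly increasing key list yields a weakly increasing list
theorem pairwise_flatMap_replicate (l : List Int) (n : Int → Nat)
    (h : l.Pairwise (· < ·)) :
    (l.flatMap (fun k => List.replicate (n k) k)).Pairwise (· ≤ ·) := by
  induction l with
  | nil => simp
  | cons k l ih =>
    rcases List.pairwise_cons.mp h with ⟨hk, h'⟩
    simp only [List.flatMap_cons]
    refine List.pairwise_append.mpr ⟨?_, ih h', ?_⟩
    · exact List.pairwise_replicate.mpr (Or.inr le_rfl)
    · intro x hx y hy
      have hxk : x = k := List.eq_of_mem_replicate hx
      rcases List.mem_flatMap.mp hy with ⟨k2, hk2, hy2⟩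
      have hyk : y = k2 := List.eq_of_mem_replicate hy2
      rw [hxk, hyk]
      exact le_of_lt (hk k2 hk2)

-- a constant map over pyRange 0 c 1 is replicate
theorem map_const_pyRange (c : Int) (k : Int) :
    (PySem.List.pyRange 0 c 1).map (fun _ => k) = List.replicate c.toNat k := by
  rw [List.map_const']
  simp [PySem.List.length_pyRange_one]

-- the core identity, over the already-filtered list m
theorem core_lemma (m : List Int) :
    PySem.List.sorted (if m.length == 0 then m ++ [-1] else m) (fun x => x) false
      = if (PySem.Dict.counter m).items = ([] : List (Int × Int)) then [-1]
        else (PySem.List.sorted (PySem.Dict.counter m).keys (fun x => x) false).flatMap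
          (fun k => (PySem.List.pyRange 0 ((PySem.Dict.counter m).getD k 0) 1).map
            (fun _ => k)) := by
  by_cases hnil : m = []
  · subst hnil
    decide
  · have hitems : (PySem.Dict.counter m).items ≠ [] := by
      rw [PySem.Dict.items_counter]
      simp only [ne_eq, List.map_eq_nil_iff]
      intro h
      exact hnil (List.eq_nil_iff_forall_not_mem.mpr
        (fun a ha => by simpa [h] using (PySem.Set.mem_ofList m a).mpr ha))
    have hlen : (m.length == 0) = false := by
      simp [List.length_eq_zero_iff, hnil]
    rw [hlen, if_neg hitems]
    have hsortnd : (PySem.List.sorted (PySem.Set.ofList m) (fun x => x) false).Pairwise (· < ·) :=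
      PySem.List.sorted_ofList_pairwise_lt m
    rw [PySem.Dict.keys_counter]
    set l := PySem.List.sorted (PySem.Set.ofList m) (fun x => x) false with hl
    have hbody : l.flatMap (fun k =>
          (PySem.List.pyRange 0 ((PySem.Dict.counter m).getD k 0) 1).map (fun _ => k))
        = l.flatMap (fun k => List.replicate (m.count k) k) := by
      apply List.flatMap_congr
      intro k _
      rw [PySem.Dict.getD_counter, map_const_pyRange]
      norm_num
    rw [hbody]
    apply PySem.List.sorted_id_eq_of_perm_of_pairwise
    · apply perm_flatMap_replicate
      · exact hsortnd.nodup
      · intro k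
        rw [hl, PySem.List.mem_sorted]
        exact PySem.Set.mem_ofList m k
    · exact pairwise_flatMap_replicate l _ hsortnd

-- ===== VERDICT (by name: the statement is the Claim_ definition above) =====
theorem solution_spec : Claim_equal_solution := by
  intro arr divisor _ _
  show solution arr divisor = solution_alt arr divisor
  unfold solution solution_alt
  rw [PySem.List.foldl_append_if_eq_filter]
  have hcounter : arr.foldl
      (fun d x => if PySem.Int.mod x divisor == 0 then d.insert x (d.getD x 0 + 1) else d)
      PySem.Dict.empty
      = PySem.Dict.counter (arr.filter (fun i => PySem.Int.mod i divisor == 0)) := by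
    rw [← PySem.Dict.foldl_insert_getD_add_one_eq_counter, List.foldl_filter]
  simp only [List.nil_append, hcounter]
  exact core_lemma (arr.filter (fun i => PySem.Int.mod i divisor == 0))
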